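-- pv_equiv track=rewrite | github.com/TheNDCC/AdventCfCode | 2025/dia8/dia8b.py | part2_last_union_x_product
-- ===== SOURCE A (Python) =====
-- class DSU:
--     def __init__(self, n):
--         self.p = list(range(n))
--         self.sz = [1]*n
--         self.components = n
--
--     def find(self, a):
--         while self.p[a] != a:
--             self.p[a] = self.p[self.p[a]]
--             a = self.p[a]
--         return a
--
--     def union(self, a, b):
--         ra = self.find(a)
--         rb = self.find(b)
--         if ra == rb:
--             return False
--         # union by size
--         if self.sz[ra] < self.sz[rb]:
--             ra, rb = rb, ra
--         self.p[rb] = ra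
--         self.sz[ra] += self.sz[rb]
--         self.components -= 1
--         return True
--
--     def comp_size(self, a):
--         return self.sz[self.find(a)]
--
-- def part2_last_union_x_product(pts, edges_sorted):
--     n = len(pts)
--     dsu = DSU(n)
--     last_pair = None
--     for d2, i, j in edges_sorted:
--         merged = dsu.union(i, j)
--         if merged:
--             # si ahora components == 1, esta fue la última unión necesaria
--             if dsu.components == 1:
--                 last_pair = (i, j)
--                 break
--     if last_pair is None:
--         raise RuntimeError("No se pudo unir todo el grafo (probablemente solo 0 o 1 punto).")
--     xi = pts[last_pair[0]][0]
--     xj = pts[last_pair[1]][0]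
--     return xi * xj
-- ===== SOURCE B (Python) =====
-- def part2_last_union_x_product(pts, edges_sorted):
--     # Quick-find instead of a DSU forest: label[k] is k's component id,
--     # merging relabels the whole of j's component in one value-based sweep.
--     n = len(pts)
--     label = list(range(n))
--     count = n
--     last_pair = None
--     for d2, i, j in edges_sorted:
--         li = label[i]
--         lj = label[j]
--         if li != lj:
--             for k in range(n):
--                 if label[k] == lj:
--                     label[k] = li
--             count -= 1
--             if count == 1:
--                 last_pair = (i, j)
--                 break
--     if last_pair is None:
--         raise RuntimeError("No se pudo unir todo el grafo (probablemente solo 0 o 1 punto).")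
--     return pts[last_pair[0]][0] * pts[last_pair[1]][0]
-- ===== Notes on version B (the rewrite author's own statement) =====
-- stated objective: alternative
-- what changed: Replaces the DSU forest (path-halving find + union by size) with a flat quick-find labelling: one component-id array and a value-based relabel sweep per merge, no parent pointers, no find loop, no size array.
import Mathlib
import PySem

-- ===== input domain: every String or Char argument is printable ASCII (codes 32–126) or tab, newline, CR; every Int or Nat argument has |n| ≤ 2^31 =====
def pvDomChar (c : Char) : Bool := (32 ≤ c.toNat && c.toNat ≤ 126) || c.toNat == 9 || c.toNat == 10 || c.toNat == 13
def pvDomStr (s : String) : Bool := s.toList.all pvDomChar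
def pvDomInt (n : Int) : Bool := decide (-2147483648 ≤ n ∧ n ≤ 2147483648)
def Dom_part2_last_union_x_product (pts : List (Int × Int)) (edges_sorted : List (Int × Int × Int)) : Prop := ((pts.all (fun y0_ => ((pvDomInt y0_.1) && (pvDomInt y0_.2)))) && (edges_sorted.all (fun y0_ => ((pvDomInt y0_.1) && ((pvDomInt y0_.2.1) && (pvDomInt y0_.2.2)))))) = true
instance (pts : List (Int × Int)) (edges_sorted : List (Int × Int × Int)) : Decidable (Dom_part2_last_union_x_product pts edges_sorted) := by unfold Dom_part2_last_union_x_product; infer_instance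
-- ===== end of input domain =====

-- B replaces A's DSU forest by a flat quick-find labelling (alternative data structure,
-- not claimed faster); equivalence is about the return value (neither Python mutates its
-- arguments).  Where Python raises (IndexError on an out-of-range endpoint, RuntimeError
-- when the graph never becomes connected) both ports return 0 / abort with none; those
-- inputs are excluded by Pre_.

-- ===== PORT A =====
-- Totalization guard shared by both ports: Python raises IndexError on an endpoint
-- outside [-n, n) (wraparound indexing); such inputs are outside Pre_.
def pvGoodEdge (n i j : Int) : Bool := decide (-n ≤ i ∧ i < n ∧ -n ≤ j ∧ j < n)

-- DSU.find: `while p[a] != a: p[a] = p[p[a]]; a = p[a]` — fuel n totalizes the while loop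
def pvFindGo (p : List Int) (a : Int) : Nat → List Int × Int
  | 0 => (p, a)
  | f+1 =>
    if PySem.List.pyGetD p a 0 = a then (p, a)
    else
      let c := PySem.List.pyGetD p (PySem.List.pyGetD p a 0) 0
      pvFindGo (PySem.List.pySetD p a c) c f

-- DSU.union with union by size
def pvUnion (p sz : List Int) (comp a b : Int) : List Int × List Int × Int × Bool :=
  let r1 := pvFindGo p a p.length
  let r2 := pvFindGo r1.1 b r1.1.length
  if r1.2 = r2.2 then (r2.1, sz, comp, false)
  else
    let swap := PySem.List.pyGetD sz r1.2 0 < PySem.List.pyGetD sz r2.2 0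
    let ra := if swap then r2.2 else r1.2
    let rb := if swap then r1.2 else r2.2
    (PySem.List.pySetD r2.1 rb ra,
     PySem.List.pySetD sz ra (PySem.List.pyGetD sz ra 0 + PySem.List.pyGetD sz rb 0),
     comp - 1, true)

def pvLoopA : List (Int × Int × Int) → List Int → List Int → Int → Option (Int × Int)
  | [], _, _, _ => none
  | (_, i, j) :: es, p, sz, comp =>
    if pvGoodEdge (p.length : Int) i j then
      let u := pvUnion p sz comp i j
      if u.2.2.2 then
        if u.2.2.1 = 1 then some (i, j) else pvLoopA es u.1 u.2.1 u.2.2.1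
      else pvLoopA es u.1 u.2.1 u.2.2.1
    else none

def part2_last_union_x_product (pts : List (Int × Int)) (edges_sorted : List (Int × Int × Int)) : Int :=
  let n := pts.length
  match pvLoopA edges_sorted (PySem.List.pyRange 0 (n : Int) 1) (List.replicate n (1 : Int)) (n : Int) with
  | none => 0  -- Python raises here (outside Pre_)
  | some (i, j) => (PySem.List.pyGetD pts i (0, 0)).1 * (PySem.List.pyGetD pts j (0, 0)).1

-- ===== PORT B =====
-- quick-find: label[k] is k's component id; a merge relabels j's whole component
def pvLoopB : List (Int × Int × Int) → List Int → Int → Option (Int × Int)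
  | [], _, _ => none
  | (_, i, j) :: es, label, count =>
    if pvGoodEdge (label.length : Int) i j then
      let li := PySem.List.pyGetD label i 0
      let lj := PySem.List.pyGetD label j 0
      if li = lj then pvLoopB es label count
      else
        let label' := label.map (fun v => if v = lj then li else v)
        if count - 1 = 1 then some (i, j) else pvLoopB es label' (count - 1)
    else none

def part2_last_union_x_product_alt (pts : List (Int × Int)) (edges_sorted : List (Int × Int × Int)) : Int :=
  let n := pts.length
  match pvLoopB edges_sorted (PySem.List.pyRange 0 (n : Int) 1) (n : Int) with
  | none => 0  -- Python raises here (outside Pre_)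
  | some (i, j) => (PySem.List.pyGetD pts i (0, 0)).1 * (PySem.List.pyGetD pts j (0, 0)).1

-- ===== PRECONDITION & SPEC =====
-- one closure expansion: add both (wrap-normalized) endpoints of every edge touching S
def pvConnStep (n : Nat) (es : List (Int × Int × Int)) (S : List Int) : List Int :=
  es.foldl (fun S e =>
    let i := if e.2.1 < 0 then e.2.1 + (n : Int) else e.2.1
    let j := if e.2.2 < 0 then e.2.2 + (n : Int) else e.2.2
    if S.contains i || S.contains j then i :: j :: S else S) S

def pvConnected (n : Nat) (es : List (Int × Int × Int)) : Bool :=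
  (List.range n).all (fun k => ((pvConnStep n es)^[n] [0]).contains (k : Int))

-- Pre_ is exactly the set of inputs on which the Python A returns normally: at least two
-- points, and some prefix of the edge list has all endpoints in Python's wraparound index
-- range [-n, n) and already connects all points (A breaks inside such a prefix); on every
-- other input A raises IndexError or RuntimeError.
def Pre_part2_last_union_x_product (pts : List (Int × Int)) (edges_sorted : List (Int × Int × Int)) : Prop :=
  2 ≤ pts.length ∧
  ((List.range (edges_sorted.length + 1)).any (fun m =>
    (edges_sorted.take m).all (fun e => pvGoodEdge (pts.length : Int) e.2.1 e.2.2) &&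
    pvConnected pts.length (edges_sorted.take m))) = true

instance (pts : List (Int × Int)) (edges_sorted : List (Int × Int × Int)) : Decidable (Pre_part2_last_union_x_product pts edges_sorted) := by
  unfold Pre_part2_last_union_x_product; infer_instance

def pvWitness_part2_last_union_x_product : (List (Int × Int)) × (List (Int × Int × Int)) :=
  ([(1, 2), (3, 4)], [(0, 0, 1)])

def Spec_part2_last_union_x_product (pts : List (Int × Int)) (edges_sorted : List (Int × Int × Int)) (out : Int) : Prop := out = part2_last_union_x_product_alt pts edges_sorted
instance (pts : List (Int × Int)) (edges_sorted : List (Int × Int × Int)) (out : Int) : Decidable (Spec_part2_last_union_x_product pts edges_sorted out) := by unfold Spec_part2_last_union_x_product; infer_instance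

-- ===== CLAIM (what is proved, stated in full; the proofs are below) =====
def Claim_equal_part2_last_union_x_product : Prop := ∀ (pts : List (Int × Int)) (edges_sorted : List (Int × Int × Int)), Dom_part2_last_union_x_product pts edges_sorted → Pre_part2_last_union_x_product pts edges_sorted → Spec_part2_last_union_x_product pts edges_sorted (part2_last_union_x_product pts edges_sorted)

-- ===== LEMMAS AND PROOFS =====

def pvg (p : List Int) (a : Int) : Int := PySem.List.pyGetD p a 0

def InRangeP (p : List Int) : Prop := ∀ x ∈ p, 0 ≤ x ∧ x < (p.length : Int)

def DecrP (p : List Int) (r : Int → Nat) : Prop :=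
  ∀ a : Int, 0 ≤ a → a < (p.length : Int) → pvg p a ≠ a → r (pvg p a) < r a

def RootOf (p : List Int) (a rt : Int) : Prop :=
  (∃ k : Nat, (pvg p)^[k] a = rt) ∧ pvg p rt = rt

-- primitive bridges ---------------------------------------------------------

lemma pvIdx_wrap (n : Nat) (a : Int) (h1 : -(n : Int) ≤ a) (h2 : a < 0) :
    PySem.List.pyIdx? n a = some (a + n).toNat := by
  simp only [PySem.List.pyIdx?]
  rw [if_neg (by omega), if_pos h1]
  congr 1
  omega

lemma pvIdx_nonneg (n : Nat) (a : Int) (h1 : 0 ≤ a) (h2 : a < (n : Int)) :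
    PySem.List.pyIdx? n a = some a.toNat := by
  simp only [PySem.List.pyIdx?]
  rw [if_pos h1, if_pos h2]

lemma pvIdx_oob (n : Nat) (a : Int) (h1 : 0 ≤ a) (h2 : ¬ a < (n : Int)) :
    PySem.List.pyIdx? n a = none := by
  simp only [PySem.List.pyIdx?]
  rw [if_pos h1, if_neg h2]

lemma pvg_wrap (p : List Int) (a : Int) (h1 : -(p.length : Int) ≤ a) (h2 : a < 0) :
    pvg p a = pvg p (a + p.length) := by
  simp only [pvg, PySem.List.pyGetD, PySem.List.pyGet?]
  rw [pvIdx_wrap p.length a h1 h2, pvIdx_nonneg p.length (a + p.length) (by omega) (by omega)]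

lemma pvSetD_wrap (p : List Int) (a v : Int) (h1 : -(p.length : Int) ≤ a) (h2 : a < 0) :
    PySem.List.pySetD p a v = PySem.List.pySetD p (a + p.length) v := by
  simp only [PySem.List.pySetD, PySem.List.pySet?]
  rw [pvIdx_wrap p.length a h1 h2, pvIdx_nonneg p.length (a + p.length) (by omega) (by omega)]

lemma pvg_eq_getElem (p : List Int) (a : Int) (h1 : 0 ≤ a) (h2 : a < (p.length : Int)) :
    pvg p a = p[a.toNat]'(by omega) := by
  simpa [pvg] using PySem.List.pyGetD_eq_getElem (xs := p) (i := a) (d := 0) h1 h2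

lemma pvg_oob (p : List Int) (a : Int) (h1 : 0 ≤ a) (h2 : ¬ a < (p.length : Int)) :
    pvg p a = 0 := by
  simp only [pvg, PySem.List.pyGetD, PySem.List.pyGet?]
  rw [pvIdx_oob p.length a h1 h2]
  rfl

lemma pvg_in_range (p : List Int) (hIR : InRangeP p) (hn : 0 < p.length) (z : Int) :
    0 ≤ pvg p z ∧ pvg p z < (p.length : Int) := by
  simp only [pvg, PySem.List.pyGetD]
  cases h : PySem.List.pyGet? p z with
  | none => simp; omega
  | some x =>
    have : x ∈ p := PySem.List.mem_of_pyGet?_eq_some p h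
    simpa using hIR x this

lemma pvg_set (p : List Int) (q v x : Int) (hq0 : 0 ≤ q) (hqn : q < (p.length : Int)) (hx : 0 ≤ x) :
    pvg (PySem.List.pySetD p q v) x = if x = q then v else pvg p x := by
  rw [PySem.List.pySetD_of_nonneg p v hq0]
  by_cases hxn : x < (p.length : Int)
  · rw [pvg_eq_getElem _ x hx (by simpa using hxn), pvg_eq_getElem p x hx hxn]
    rw [List.getElem_set]
    by_cases hxq : x = q
    · subst hxq; rw [if_pos rfl, if_pos (by omega)]
    · rw [if_neg hxq, if_neg (by omega)]
  · rw [pvg_oob _ x hx (by simpa using hxn), pvg_oob p x hx hxn, if_neg (by omega)]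

lemma length_pvSetD (p : List Int) (q v : Int) :
    (PySem.List.pySetD p q v).length = p.length := PySem.List.length_pySetD p q v

lemma inRange_set (p : List Int) (q v : Int) (hIR : InRangeP p) (hq0 : 0 ≤ q)
    (hv0 : 0 ≤ v) (hvn : v < (p.length : Int)) : InRangeP (PySem.List.pySetD p q v) := by
  intro x hx
  rw [length_pvSetD]
  rw [PySem.List.pySetD_of_nonneg p v hq0] at hx
  rcases List.mem_or_eq_of_mem_set hx with h1 | h1
  · exact hIR x h1
  · subst h1; exact ⟨hv0, hvn⟩

-- RootOf toolbox ------------------------------------------------------------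

lemma rootOf_fix (p : List Int) (x rt : Int) (h : pvg p x = x) :
    RootOf p x rt ↔ rt = x := by
  constructor
  · rintro ⟨⟨k, hk⟩, -⟩
    rw [Function.iterate_fixed h] at hk; omega
  · rintro rfl; exact ⟨⟨0, rfl⟩, h⟩

lemma rootOf_prepend (p : List Int) (x rt : Int) (h : RootOf p (pvg p x) rt) :
    RootOf p x rt := by
  obtain ⟨⟨k, hk⟩, hr⟩ := h
  exact ⟨⟨k + 1, by rw [Function.iterate_succ_apply]; exact hk⟩, hr⟩

lemma rootOf_step (p : List Int) (x rt : Int) (h : pvg p x ≠ x) :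
    RootOf p x rt ↔ RootOf p (pvg p x) rt := by
  constructor
  · rintro ⟨⟨k, hk⟩, hr⟩
    cases k with
    | zero => simp at hk; subst hk; exact absurd hr h
    | succ k => exact ⟨⟨k, by rw [Function.iterate_succ_apply] at hk; exact hk⟩, hr⟩
  · exact rootOf_prepend p x rt

lemma rootOf_unique (p : List Int) (x r1 r2 : Int)
    (h1 : RootOf p x r1) (h2 : RootOf p x r2) : r1 = r2 := by
  obtain ⟨⟨k, hk⟩, hr1⟩ := h1
  obtain ⟨⟨m, hm⟩, hr2⟩ := h2
  rcases le_total k m with h | h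
  · have : (pvg p)^[m] x = r1 := by
      have := Function.iterate_add_apply (pvg p) (m - k) k x
      rw [hk] at this
      rw [show m = m - k + k by omega, this, Function.iterate_fixed hr1]
    rw [hm] at this; omega
  · have : (pvg p)^[k] x = r2 := by
      have := Function.iterate_add_apply (pvg p) (k - m) m x
      rw [hm] at this
      rw [show k = k - m + m by omega, this, Function.iterate_fixed hr2]
    rw [hk] at this; omega

lemma root_exists (p : List Int) (r : Int → Nat) (hIR : InRangeP p) (hD : DecrP p r) :
    ∀ x : Int, 0 ≤ x → x < (p.length : Int) → ∃ rt, RootOf p x rt := by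
  intro x
  induction hm : r x using Nat.strong_induction_on generalizing x with
  | _ m IH =>
    intro hx0 hxn
    by_cases h : pvg p x = x
    · exact ⟨x, ⟨⟨0, rfl⟩, h⟩⟩
    · have hlt := hD x hx0 hxn h
      have hy := pvg_in_range p hIR (by omega) x
      obtain ⟨rt, hrt⟩ := IH (r (pvg p x)) (by omega) (pvg p x) rfl hy.1 hy.2
      exact ⟨rt, rootOf_prepend p x rt hrt⟩

lemma rootOf_two_step (p : List Int) (q rt : Int) (hIR : InRangeP p)
    (hq0 : 0 ≤ q) (hqn : q < (p.length : Int)) (hne : pvg p q ≠ q) :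
    RootOf p q rt ↔ RootOf p (pvg p (pvg p q)) rt := by
  rw [rootOf_step p q rt hne]
  by_cases h : pvg p (pvg p q) = pvg p q
  · rw [h]
  · exact rootOf_step p (pvg p q) rt h

-- measure for fuel ----------------------------------------------------------

def Mcard (n : Nat) (r : Int → Nat) (a : Int) : Nat :=
  ((Finset.range n).filter (fun k : Nat => r (k : Int) ≤ r a)).card

lemma Mcard_le (n : Nat) (r : Int → Nat) (a : Int) : Mcard n r a ≤ n := by
  unfold Mcard
  exact le_trans (Finset.card_filter_le _ _) (by simp)

lemma Mcard_pos (n : Nat) (r : Int → Nat) (a : Int) (h0 : 0 ≤ a) (hn : a < (n : Int)) :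
    0 < Mcard n r a := by
  unfold Mcard
  apply Finset.card_pos.mpr
  refine ⟨a.toNat, Finset.mem_filter.mpr ⟨Finset.mem_range.mpr (by omega), ?_⟩⟩
  simp [Int.toNat_of_nonneg h0]

lemma Mcard_lt (n : Nat) (r : Int → Nat) (a c : Int) (h0 : 0 ≤ a) (hn : a < (n : Int))
    (h : r c < r a) : Mcard n r c < Mcard n r a := by
  unfold Mcard
  apply Finset.card_lt_card
  constructor
  · intro k hk
    simp only [Finset.mem_filter] at hk ⊢
    exact ⟨hk.1, le_trans hk.2 (by omega)⟩
  · intro hsub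
    have ha : a.toNat ∈ (Finset.range n).filter (fun k : Nat => r (k : Int) ≤ r a) := by
      refine Finset.mem_filter.mpr ⟨Finset.mem_range.mpr (by omega), ?_⟩
      simp [Int.toNat_of_nonneg h0]
    have := hsub ha
    simp only [Finset.mem_filter, Int.toNat_of_nonneg h0] at this
    omega

-- compression ---------------------------------------------------------------

lemma compress (p : List Int) (r : Int → Nat) (q : Int)
    (hIR : InRangeP p) (hD : DecrP p r)
    (hq0 : 0 ≤ q) (hqn : q < (p.length : Int)) (hne : pvg p q ≠ q) :
    (PySem.List.pySetD p q (pvg p (pvg p q))).length = p.length ∧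
    InRangeP (PySem.List.pySetD p q (pvg p (pvg p q))) ∧
    DecrP (PySem.List.pySetD p q (pvg p (pvg p q))) r ∧
    (∀ x rt, 0 ≤ x → x < (p.length : Int) →
      (RootOf (PySem.List.pySetD p q (pvg p (pvg p q))) x rt ↔ RootOf p x rt)) ∧
    r (pvg p (pvg p q)) < r q := by
  have hn : 0 < p.length := by omega
  set b := pvg p q with hb
  set c := pvg p b with hc
  have hbr := pvg_in_range p hIR hn q
  have hcr := pvg_in_range p hIR hn b
  have hrb : r b < r q := hD q hq0 hqn hne
  have hrc : r c < r q := by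
    by_cases h : pvg p b = b
    · rw [hc, h]; exact hrb
    · exact lt_trans (hD b hbr.1 hbr.2 h) hrb
  set p' := PySem.List.pySetD p q c with hp'
  have hlen : p'.length = p.length := length_pvSetD p q c
  have hget : ∀ x : Int, 0 ≤ x → pvg p' x = if x = q then c else pvg p x :=
    fun x hx => pvg_set p q c x hq0 hqn hx
  have hIR' : InRangeP p' := inRange_set p q c hIR hq0 hcr.1 hcr.2
  have hD' : DecrP p' r := by
    intro a ha0 han hne'
    rw [hlen] at han
    rw [hget a ha0] at hne' ⊢
    by_cases haq : a = q
    · subst haq; simp only at hne' ⊢; exact hrc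
    · simp only [if_neg haq] at hne' ⊢; exact hD a ha0 han hne'
  have hcq : c ≠ q := fun h => by rw [h] at hrc; omega
  refine ⟨hlen, hIR', hD', ?_, hrc⟩
  intro x rt hx0 hxn
  have hqc : RootOf p q rt ↔ RootOf p c rt := rootOf_two_step p q rt hIR hq0 hqn hne
  constructor
  · -- p' → p, strong induction on r x
    induction hm : r x using Nat.strong_induction_on generalizing x with
    | _ m IH =>
      intro h
      by_cases hxq : x = q
      · subst hxq
        have hst : pvg p' x = c := by rw [hget x hx0]; simp
        have h2 : RootOf p' c rt := by
          rw [rootOf_step p' x rt (by rw [hst]; exact hcq)] at h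
          rwa [hst] at h
        have := IH (r c) (by omega) c hcr.1 hcr.2 rfl h2
        exact hqc.mpr this
      · have hst : pvg p' x = pvg p x := by rw [hget x hx0]; simp [hxq]
        by_cases hfix : pvg p x = x
        · have hrtx : rt = x := (rootOf_fix p' x rt (by rw [hst, hfix])).mp h
          rw [hrtx]; exact ⟨⟨0, rfl⟩, hfix⟩
        · have hy := pvg_in_range p hIR hn x
          have h2 : RootOf p' (pvg p x) rt := by
            rw [rootOf_step p' x rt (by rw [hst]; exact hfix)] at h
            rwa [hst] at h
          have := IH (r (pvg p x)) (by have := hD x hx0 hxn hfix; omega)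
            (pvg p x) hy.1 hy.2 rfl h2
          exact rootOf_prepend p x rt this
  · -- p → p', strong induction on r x
    induction hm : r x using Nat.strong_induction_on generalizing x with
    | _ m IH =>
      intro h
      by_cases hxq : x = q
      · subst hxq
        have h2 : RootOf p c rt := hqc.mp h
        have h3 : RootOf p' c rt := IH (r c) (by omega) c hcr.1 hcr.2 rfl h2
        apply rootOf_prepend
        rw [hget x hx0]; simpa using h3
      · by_cases hfix : pvg p x = x
        · have hrtx : rt = x := (rootOf_fix p x rt hfix).mp h
          rw [hrtx]
          exact ⟨⟨0, rfl⟩, by rw [hget x hx0]; simp [hxq, hfix]⟩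
        · have hy := pvg_in_range p hIR hn x
          have h2 : RootOf p (pvg p x) rt := (rootOf_step p x rt hfix).mp h
          have h3 := IH (r (pvg p x)) (by have := hD x hx0 hxn hfix; omega)
            (pvg p x) hy.1 hy.2 rfl h2
          apply rootOf_prepend
          rw [hget x hx0]; simpa [hxq] using h3

-- find ----------------------------------------------------------------------

lemma findGo_fix (p : List Int) (x : Int) (f : Nat) (h : pvg p x = x) :
    pvFindGo p x f = (p, x) := by
  cases f with
  | zero => rfl
  | succ f => simp only [pvFindGo]; rw [if_pos (by simpa [pvg] using h)]

lemma find_spec : ∀ (f : Nat) (p : List Int) (a : Int) (r : Int → Nat),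
    InRangeP p → DecrP p r → 0 ≤ a → a < (p.length : Int) →
    Mcard p.length r a ≤ f →
    ∃ rt, RootOf p a rt ∧ 0 ≤ rt ∧ rt < (p.length : Int) ∧
      (pvFindGo p a f).2 = rt ∧
      (pvFindGo p a f).1.length = p.length ∧
      InRangeP (pvFindGo p a f).1 ∧ DecrP (pvFindGo p a f).1 r ∧
      (∀ x t, 0 ≤ x → x < (p.length : Int) →
        (RootOf (pvFindGo p a f).1 x t ↔ RootOf p x t)) := by
  intro f
  induction f with
  | zero =>
    intro p a r hIR hD ha0 han hM
    have := Mcard_pos p.length r a ha0 han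
    omega
  | succ f IH =>
    intro p a r hIR hD ha0 han hM
    by_cases hfix : pvg p a = a
    · refine ⟨a, ⟨⟨0, rfl⟩, hfix⟩, ha0, han, ?_⟩
      rw [findGo_fix p a (f+1) hfix]
      exact ⟨rfl, rfl, hIR, hD, fun x t _ _ => Iff.rfl⟩
    · have hred : pvFindGo p a (f + 1) =
          pvFindGo (PySem.List.pySetD p a (pvg p (pvg p a))) (pvg p (pvg p a)) f := by
        simp only [pvFindGo]
        rw [if_neg (by simpa [pvg] using hfix)]
        simp only [pvg]
      obtain ⟨hlen, hIR', hD', hiff, hrc⟩ := compress p r a hIR hD ha0 han hfix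
      set c := pvg p (pvg p a) with hc
      set p' := PySem.List.pySetD p a c with hp'
      have hn : 0 < p.length := by omega
      have hcr := pvg_in_range p hIR hn (pvg p a)
      have hM' : Mcard p'.length r c ≤ f := by
        rw [hlen]
        have := Mcard_lt p.length r a c ha0 han hrc
        omega
      obtain ⟨rt, hroot, hrt0, hrtn, hres, hlen2, hIR2, hD2, hiff2⟩ :=
        IH p' c r hIR' hD' hcr.1 (by rw [hlen]; exact hcr.2) hM'
      rw [hlen] at hrtn hlen2
      refine ⟨rt, ?_, hrt0, hrtn, ?_, ?_, ?_, ?_, ?_⟩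
      · exact (rootOf_two_step p a rt hIR ha0 han hfix).mpr
          ((hiff c rt hcr.1 hcr.2).mp hroot)
      · rw [hred]; exact hres
      · rw [hred]; exact hlen2
      · rw [hred]; exact hIR2
      · rw [hred]; exact hD2
      · rw [hred]; intro x t hx0 hxn
        rw [hiff2 x t hx0 (by rw [hlen]; exact hxn)]
        exact hiff x t hx0 hxn

def pvNorm (n : Nat) (a : Int) : Int := if a < 0 then a + n else a

lemma find_full (p : List Int) (a : Int) (r : Int → Nat)
    (hIR : InRangeP p) (hD : DecrP p r)
    (h1 : -(p.length : Int) ≤ a) (h2 : a < (p.length : Int)) :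
    ∃ rt, RootOf p (pvNorm p.length a) rt ∧ 0 ≤ rt ∧ rt < (p.length : Int) ∧
      (pvFindGo p a p.length).2 = rt ∧
      (pvFindGo p a p.length).1.length = p.length ∧
      InRangeP (pvFindGo p a p.length).1 ∧ DecrP (pvFindGo p a p.length).1 r ∧
      (∀ x t, 0 ≤ x → x < (p.length : Int) →
        (RootOf (pvFindGo p a p.length).1 x t ↔ RootOf p x t)) := by
  by_cases ha : 0 ≤ a
  · have : pvNorm p.length a = a := by simp [pvNorm]; omega
    rw [this]
    exact find_spec p.length p a r hIR hD ha h2 (Mcard_le _ _ _)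
  · -- negative start: one unfolding step lands on the wrapped index
    have hneg : a < 0 := by omega
    have hn : 0 < p.length := by omega
    set q := a + (p.length : Int) with hq
    have hq0 : 0 ≤ q := by omega
    have hqn : q < (p.length : Int) := by omega
    have hnorm : pvNorm p.length a = q := by simp [pvNorm, hneg]; omega
    obtain ⟨m, hm⟩ : ∃ m, p.length = m + 1 := ⟨p.length - 1, by omega⟩
    have hwrap : pvg p a = pvg p q := pvg_wrap p a h1 hneg
    have hb := pvg_in_range p hIR hn q
    have hfix : ¬ (PySem.List.pyGetD p a 0 = a) := by
      show ¬ (pvg p a = a); rw [hwrap]; omega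
    have e1 : PySem.List.pyGetD p (PySem.List.pyGetD p a 0) 0 = pvg p (pvg p q) := by
      show pvg p (pvg p a) = pvg p (pvg p q)
      rw [hwrap]
    have hred : pvFindGo p a p.length =
        pvFindGo (PySem.List.pySetD p a (pvg p (pvg p q))) (pvg p (pvg p q)) m := by
      rw [hm]
      simp only [pvFindGo]
      rw [if_neg hfix, e1]
    have hsetw : PySem.List.pySetD p a (pvg p (pvg p q)) =
        PySem.List.pySetD p q (pvg p (pvg p q)) := pvSetD_wrap p a _ h1 hneg
    rw [hnorm, hred, hsetw]
    by_cases hqfix : pvg p q = q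
    · -- q is already a root; the written value is q itself, so the list is unchanged
      have hval : pvg p (pvg p q) = q := by rw [hqfix, hqfix]
      have hsame : PySem.List.pySetD p q (pvg p (pvg p q)) = p := by
        rw [hval]
        rw [PySem.List.pySetD_of_nonneg p q hq0]
        have : p[q.toNat]'(by omega) = q := by
          rw [← pvg_eq_getElem p q hq0 hqn, hqfix]
        calc p.set q.toNat q = p.set q.toNat (p[q.toNat]'(by omega)) := by rw [this]
          _ = p := List.set_getElem_self _
      rw [hsame, hval, findGo_fix p q m hqfix]
      exact ⟨q, ⟨⟨0, rfl⟩, hqfix⟩, hq0, hqn, rfl, rfl, hIR, hD,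
        fun x t _ _ => Iff.rfl⟩
    · obtain ⟨hlen, hIR', hD', hiff, hrc⟩ := compress p r q hIR hD hq0 hqn hqfix
      set c := pvg p (pvg p q) with hc
      set p' := PySem.List.pySetD p q c with hp'
      have hcrng := pvg_in_range p hIR hn (pvg p q)
      have hM' : Mcard p'.length r c ≤ m := by
        rw [hlen]
        have := Mcard_lt p.length r q c hq0 hqn hrc
        have := Mcard_le p.length r q
        omega
      obtain ⟨rt, hroot, hrt0, hrtn, hres, hlen2, hIR2, hD2, hiff2⟩ :=
        find_spec m p' c r hIR' hD' hcrng.1 (by rw [hlen]; exact hcrng.2) hM'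
      rw [hlen] at hrtn hlen2
      refine ⟨rt, ?_, hrt0, hrtn, hres, hlen2, hIR2, hD2, ?_⟩
      · exact (rootOf_two_step p q rt hIR hq0 hqn hqfix).mpr
          ((hiff c rt hcrng.1 hcrng.2).mp hroot)
      · intro x t hx0 hxn
        rw [hiff2 x t hx0 (by rw [hlen]; exact hxn)]
        exact hiff x t hx0 hxn

-- linking two roots ---------------------------------------------------------

lemma link (p : List Int) (r : Int → Nat) (ra rb : Int)
    (hIR : InRangeP p) (hD : DecrP p r)
    (hra0 : 0 ≤ ra) (hran : ra < (p.length : Int))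
    (hrb0 : 0 ≤ rb) (hrbn : rb < (p.length : Int))
    (hrar : pvg p ra = ra) (hrbr : pvg p rb = rb) (hne : ra ≠ rb) :
    (PySem.List.pySetD p rb ra).length = p.length ∧
    InRangeP (PySem.List.pySetD p rb ra) ∧
    (∃ r', DecrP (PySem.List.pySetD p rb ra) r') ∧
    (∀ x rt, 0 ≤ x → x < (p.length : Int) → RootOf p x rt →
      RootOf (PySem.List.pySetD p rb ra) x (if rt = rb then ra else rt)) := by
  have hn : 0 < p.length := by omega
  set p' := PySem.List.pySetD p rb ra with hp'
  have hlen : p'.length = p.length := length_pvSetD p rb ra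
  have hget : ∀ x : Int, 0 ≤ x → pvg p' x = if x = rb then ra else pvg p x :=
    fun x hx => pvg_set p rb ra x hrb0 hrbn hx
  have hIR' : InRangeP p' := inRange_set p rb ra hIR hrb0 hra0 hran
  have hrara : ∀ rt, RootOf p ra rt ↔ rt = ra := fun rt => rootOf_fix p ra rt hrar
  have hrbrb : ∀ rt, RootOf p rb rt ↔ rt = rb := fun rt => rootOf_fix p rb rt hrbr
  refine ⟨hlen, hIR', ?_, ?_⟩
  · -- new decreasing measure
    classical
    refine ⟨fun x => if RootOf p x rb then r x + r ra + 1 else r x, ?_⟩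
    intro a ha0 han hne'
    rw [hlen] at han
    rw [hget a ha0] at hne'
    beta_reduce
    rw [hget a ha0]
    by_cases hab : a = rb
    · rw [if_pos hab] at hne' ⊢
      have h1 : ¬ RootOf p ra rb := fun h => hne ((hrara rb).mp h).symm
      have h2 : RootOf p a rb := by rw [hab]; exact (hrbrb rb).mpr rfl
      rw [if_neg h1, if_pos h2]
      omega
    · rw [if_neg hab] at hne' ⊢
      have hstep : RootOf p (pvg p a) rb ↔ RootOf p a rb :=
        (rootOf_step p a rb hne').symm
      have hd := hD a ha0 han hne'
      by_cases hcls : RootOf p a rb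
      · rw [if_pos (hstep.mpr hcls), if_pos hcls]; omega
      · rw [if_neg (fun h => hcls (hstep.mp h)), if_neg hcls]; omega
  · intro x rt hx0 hxn
    induction hm : r x using Nat.strong_induction_on generalizing x with
    | _ m IH =>
      intro h
      by_cases hfix : pvg p x = x
      · have hrtx : rt = x := (rootOf_fix p x rt hfix).mp h
        rw [hrtx]
        by_cases hxb : x = rb
        · rw [if_pos hxb]
          apply rootOf_prepend
          rw [hget x hx0, if_pos hxb]
          refine ⟨⟨0, rfl⟩, ?_⟩
          rw [hget ra hra0, if_neg hne, hrar]
        · rw [if_neg hxb]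
          exact ⟨⟨0, rfl⟩, by rw [hget x hx0, if_neg hxb]; exact hfix⟩
      · have hxb : x ≠ rb := fun hh => by rw [hh, hrbr] at hfix; exact hfix rfl
        have hy := pvg_in_range p hIR hn x
        have h2 : RootOf p (pvg p x) rt := (rootOf_step p x rt hfix).mp h
        have h3 := IH (r (pvg p x)) (by have := hD x hx0 hxn hfix; omega)
          (pvg p x) hy.1 hy.2 rfl h2
        apply rootOf_prepend
        rw [hget x hx0, if_neg hxb]
        exact h3

-- the label-side relabel -----------------------------------------------------

lemma pvg_map (label : List Int) (g : Int → Int) (x : Int)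
    (hx0 : 0 ≤ x) (hxn : x < (label.length : Int)) :
    pvg (label.map g) x = g (pvg label x) := by
  rw [pvg_eq_getElem _ x hx0 (by simpa using hxn),
      pvg_eq_getElem label x hx0 hxn]
  simp

lemma pvCollapseEq (u w t s : Int) :
    ((if t = w then u else t) = (if s = w then u else s)) ↔
      (t = s ∨ ((t = u ∨ t = w) ∧ (s = u ∨ s = w))) := by
  by_cases h1 : t = w <;> by_cases h2 : s = w <;> simp [h1, h2] <;> omega

-- main loop equivalence ------------------------------------------------------

lemma loop_eq : ∀ (edges : List (Int × Int × Int)) (p sz label : List Int) (comp : Int)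
    (r : Int → Nat),
    p.length = label.length → InRangeP p → DecrP p r →
    (∀ x y : Int, 0 ≤ x → x < (p.length : Int) → 0 ≤ y → y < (p.length : Int) →
      ((∃ rt, RootOf p x rt ∧ RootOf p y rt) ↔ pvg label x = pvg label y)) →
    pvLoopA edges p sz comp = pvLoopB edges label comp := by
  intro edges
  induction edges with
  | nil => intro p sz label comp r _ _ _ _; rfl
  | cons e es IH =>
    obtain ⟨d, i, j⟩ := e
    intro p sz label comp r hLen hIR hD hLab
    by_cases hg : pvGoodEdge (p.length : Int) i j = true
    · have hgb : pvGoodEdge (label.length : Int) i j = true := by rwa [← hLen]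
      simp only [pvLoopA, pvLoopB, hg, hgb, if_true]
      have hrange : -(p.length : Int) ≤ i ∧ i < p.length ∧
          -(p.length : Int) ≤ j ∧ j < p.length := by
        simpa [pvGoodEdge] using hg
      obtain ⟨hi1, hi2, hj1, hj2⟩ := hrange
      have hn : 0 < p.length := by
        by_contra hh
        have : (p.length : Int) ≤ 0 := by omega
        omega
      set i' := pvNorm p.length i with hi'
      set j' := pvNorm p.length j with hj'
      have hi'r : 0 ≤ i' ∧ i' < (p.length : Int) := by
        rw [hi']; unfold pvNorm; split <;> omega
      have hj'r : 0 ≤ j' ∧ j' < (p.length : Int) := by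
        rw [hj']; unfold pvNorm; split <;> omega
      -- first find
      obtain ⟨ra, hraRoot, hra0, hran, hraRes, hlen1, hIR1, hD1, hiff1⟩ :=
        find_full p i r hIR hD hi1 hi2
      set p1 := (pvFindGo p i p.length).1 with hp1
      -- second find
      obtain ⟨rb, hrbRoot1, hrb0, hrbn, hrbRes, hlen2, hIR2, hD2, hiff2⟩ :=
        find_full p1 j r hIR1 hD1 (by rw [hlen1]; exact hj1) (by rw [hlen1]; exact hj2)
      set p2 := (pvFindGo p1 j p1.length).1 with hp2
      rw [hlen1] at hrbn hlen2
      have hnormj : pvNorm p1.length j = j' := by rw [hlen1]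
      rw [hnormj] at hrbRoot1
      have hrbRoot : RootOf p j' rb := (hiff1 j' rb hj'r.1 hj'r.2).mp hrbRoot1
      -- the p2 partition still matches label
      have hiff12 : ∀ x t, 0 ≤ x → x < (p.length : Int) →
          (RootOf p2 x t ↔ RootOf p x t) := by
        intro x t hx0 hxn
        rw [hiff2 x t hx0 (by rw [hlen1]; exact hxn)]
        exact hiff1 x t hx0 hxn
      have hLab2 : ∀ x y : Int, 0 ≤ x → x < (p.length : Int) → 0 ≤ y →
          y < (p.length : Int) →
          ((∃ rt, RootOf p2 x rt ∧ RootOf p2 y rt) ↔ pvg label x = pvg label y) := by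
        intro x y hx0 hxn hy0 hyn
        rw [← hLab x y hx0 hxn hy0 hyn]
        constructor
        · rintro ⟨rt, h1, h2⟩
          exact ⟨rt, (hiff12 x rt hx0 hxn).mp h1, (hiff12 y rt hy0 hyn).mp h2⟩
        · rintro ⟨rt, h1, h2⟩
          exact ⟨rt, (hiff12 x rt hx0 hxn).mpr h1, (hiff12 y rt hy0 hyn).mpr h2⟩
      -- label values at i and j equal the values at the normalized indices
      have hlabl : label.length = p.length := hLen.symm
      have hli : pvg label i = pvg label i' := by
        unfold pvNorm at hi'
        by_cases hh : i < 0
        · rw [hi', if_pos hh, ← hlabl]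
          exact pvg_wrap label i (by omega) hh
        · rw [hi', if_neg hh]
      have hlj : pvg label j = pvg label j' := by
        unfold pvNorm at hj'
        by_cases hh : j < 0
        · rw [hj', if_pos hh, ← hlabl]
          exact pvg_wrap label j (by omega) hh
        · rw [hj', if_neg hh]
      -- merge condition agreement
      have hcond : ra = rb ↔ pvg label i = pvg label j := by
        rw [hli, hlj, ← hLab i' j' hi'r.1 hi'r.2 hj'r.1 hj'r.2]
        constructor
        · intro h; exact ⟨ra, hraRoot, h ▸ hrbRoot⟩
        · rintro ⟨rt, h1, h2⟩
          rw [rootOf_unique p i' ra rt hraRoot h1,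
              rootOf_unique p j' rb rt hrbRoot h2]
      -- unfold the union
      have hUnfold : pvUnion p sz comp i j =
          (if ra = rb then (p2, sz, comp, false)
           else
             (PySem.List.pySetD p2
                (if PySem.List.pyGetD sz ra 0 < PySem.List.pyGetD sz rb 0 then ra else rb)
                (if PySem.List.pyGetD sz ra 0 < PySem.List.pyGetD sz rb 0 then rb else ra),
              PySem.List.pySetD sz
                (if PySem.List.pyGetD sz ra 0 < PySem.List.pyGetD sz rb 0 then rb else ra)
                (PySem.List.pyGetD sz
                  (if PySem.List.pyGetD sz ra 0 < PySem.List.pyGetD sz rb 0 then rb else ra) 0 +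
                 PySem.List.pyGetD sz
                  (if PySem.List.pyGetD sz ra 0 < PySem.List.pyGetD sz rb 0 then ra else rb) 0),
              comp - 1, true)) := by
        simp only [pvUnion, ← hp1, ← hp2, hraRes, hrbRes]
      by_cases hmerge : ra = rb
      · -- no merge on either side
        have hlieq : PySem.List.pyGetD label i 0 = PySem.List.pyGetD label j 0 :=
          hcond.mp hmerge
        rw [hUnfold, if_pos hmerge, if_neg Bool.false_ne_true, if_pos hlieq]
        exact IH p2 sz label comp r (by rw [hlen2]; exact hLen) hIR2 hD2
          (by intro x y hx0 hxn hy0 hyn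
              exact hLab2 x y hx0 (by rw [← hlen2]; exact hxn) hy0 (by rw [← hlen2]; exact hyn))
      · -- merge
        have hlne : ¬ (PySem.List.pyGetD label i 0 = PySem.List.pyGetD label j 0) :=
          fun h => hmerge (hcond.mpr h)
        rw [hUnfold, if_neg hmerge, if_pos rfl, if_neg hlne]
        -- orientation chosen by size comparison
        set swap := PySem.List.pyGetD sz ra 0 < PySem.List.pyGetD sz rb 0 with hswap
        set ra' : Int := if swap then rb else ra with hra'
        set rb' : Int := if swap then ra else rb with hrb'
        have hra'0 : 0 ≤ ra' := by rw [hra']; split <;> omega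
        have hra'n : ra' < (p.length : Int) := by rw [hra']; split <;> omega
        have hrb'0 : 0 ≤ rb' := by rw [hrb']; split <;> omega
        have hrb'n : rb' < (p.length : Int) := by rw [hrb']; split <;> omega
        have hraR2 : RootOf p2 i' ra := (hiff12 i' ra hi'r.1 hi'r.2).mpr hraRoot
        have hrbR2 : RootOf p2 j' rb := (hiff12 j' rb hj'r.1 hj'r.2).mpr hrbRoot
        have hraFix : pvg p2 ra = ra := hraR2.2
        have hrbFix : pvg p2 rb = rb := hrbR2.2
        have hra'Fix : pvg p2 ra' = ra' := by rw [hra']; split <;> assumption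
        have hrb'Fix : pvg p2 rb' = rb' := by rw [hrb']; split <;> assumption
        have hne' : ra' ≠ rb' := by
          rw [hra', hrb']; split <;> [exact fun h => hmerge h.symm; exact hmerge]
        obtain ⟨hlen3, hIR3, ⟨r3, hD3⟩, hmap⟩ :=
          link p2 r ra' rb' hIR2 hD2 hra'0 (by rw [hlen2]; exact hra'n)
            hrb'0 (by rw [hlen2]; exact hrb'n) hra'Fix hrb'Fix hne'
        set p3 := PySem.List.pySetD p2 rb' ra' with hp3
        rw [hlen2] at hlen3
        set li := pvg label i with hlidef
        set lj := pvg label j with hljdef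
        set label' := label.map (fun v => if v = lj then li else v) with hlabel'
        have hlab'len : label'.length = label.length := by rw [hlabel']; simp
        -- characterize roots against labels
        have hLi' : pvg label i' = li := hli.symm
        have hLj' : pvg label j' = lj := hlj.symm
        have hchar : ∀ x t, 0 ≤ x → x < (p.length : Int) → RootOf p2 x t →
            (t = ra ↔ pvg label x = li) ∧ (t = rb ↔ pvg label x = lj) := by
          intro x t hx0 hxn hroot
          constructor
          · rw [← hLi', ← hLab2 x i' hx0 hxn hi'r.1 hi'r.2]
            constructor
            · intro h; exact ⟨ra, h ▸ hroot, hraR2⟩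
            · rintro ⟨rt, h1, h2⟩
              rw [rootOf_unique p2 x t rt hroot h1]
              exact rootOf_unique p2 i' rt ra h2 hraR2
          · rw [← hLj', ← hLab2 x j' hx0 hxn hj'r.1 hj'r.2]
            constructor
            · intro h; exact ⟨rb, h ▸ hroot, hrbR2⟩
            · rintro ⟨rt, h1, h2⟩
              rw [rootOf_unique p2 x t rt hroot h1]
              exact rootOf_unique p2 j' rt rb h2 hrbR2
        have hcharlbl : ∀ x t, 0 ≤ x → x < (p.length : Int) → RootOf p2 x t →
            ((t = ra' ∨ t = rb') ↔ (pvg label x = li ∨ pvg label x = lj)) := by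
          intro x t hx0 hxn hroot
          obtain ⟨c2, c3⟩ := hchar x t hx0 hxn hroot
          rw [hra', hrb']
          by_cases hs : swap
          · rw [if_pos hs, if_pos hs, c3, c2]; tauto
          · rw [if_neg hs, if_neg hs, c2, c3]
        have hlabne : li ≠ lj := hlne
        have hLab3 : ∀ x y : Int, 0 ≤ x → x < (p.length : Int) → 0 ≤ y →
            y < (p.length : Int) →
            ((∃ rt, RootOf p3 x rt ∧ RootOf p3 y rt) ↔ pvg label' x = pvg label' y) := by
          intro x y hx0 hxn hy0 hyn
          obtain ⟨tx, htx⟩ := root_exists p2 r hIR2 hD2 x hx0 (by rw [hlen2]; exact hxn)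
          obtain ⟨ty, hty⟩ := root_exists p2 r hIR2 hD2 y hy0 (by rw [hlen2]; exact hyn)
          have fx := hmap x tx hx0 (by rw [hlen2]; exact hxn) htx
          have fy := hmap y ty hy0 (by rw [hlen2]; exact hyn) hty
          have hLHS : (∃ rt, RootOf p3 x rt ∧ RootOf p3 y rt) ↔
              (if tx = rb' then ra' else tx) = (if ty = rb' then ra' else ty) := by
            constructor
            · rintro ⟨rt, h1, h2⟩
              exact (rootOf_unique p3 x _ rt fx h1).trans
                (rootOf_unique p3 y _ rt fy h2).symm
            · intro h; exact ⟨_, fx, h ▸ fy⟩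
          have hmx : pvg label' x = if pvg label x = lj then li else pvg label x := by
            rw [hlabel', pvg_map label _ x hx0 (by rw [hlabl]; exact hxn)]
          have hmy : pvg label' y = if pvg label y = lj then li else pvg label y := by
            rw [hlabel', pvg_map label _ y hy0 (by rw [hlabl]; exact hyn)]
          rw [hLHS, hmx, hmy, pvCollapseEq ra' rb' tx ty, pvCollapseEq li lj]
          have c1 : tx = ty ↔ pvg label x = pvg label y := by
            rw [← hLab2 x y hx0 hxn hy0 hyn]
            constructor
            · rintro rfl; exact ⟨tx, htx, hty⟩
            · rintro ⟨rt, h1, h2⟩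
              rw [rootOf_unique p2 x tx rt htx h1, rootOf_unique p2 y ty rt hty h2]
          have cx := hcharlbl x tx hx0 hxn htx
          have cy := hcharlbl y ty hy0 hyn hty
          rw [c1, cx, cy]
        -- both loops take the same branch
        by_cases hcnt : comp - 1 = 1
        · rw [if_pos hcnt, if_pos hcnt]
        · rw [if_neg hcnt, if_neg hcnt]
          apply IH p3 _ label' (comp - 1) r3
          · rw [hlen3, hlab'len]; exact hLen
          · exact hIR3
          · exact hD3
          · intro x y hx0 hxn hy0 hyn
            rw [hlen3] at hxn hyn
            exact hLab3 x y hx0 hxn hy0 hyn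
    · have hgb : ¬ (pvGoodEdge (label.length : Int) i j = true) := by rwa [← hLen]
      simp only [pvLoopA, pvLoopB, hg, hgb]
      rw [if_neg Bool.false_ne_true, if_neg Bool.false_ne_true]

theorem parts_eq : ∀ (pts : List (Int × Int)) (edges : List (Int × Int × Int)),
    part2_last_union_x_product pts edges = part2_last_union_x_product_alt pts edges := by
  intro pts edges
  have hlen0 : (PySem.List.pyRange 0 (pts.length : Int) 1).length = pts.length := by
    rw [PySem.List.length_pyRange_one]; omega
  have hfix0 : ∀ a : Int, 0 ≤ a →
      a < ((PySem.List.pyRange 0 (pts.length : Int) 1).length : Int) →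
      pvg (PySem.List.pyRange 0 (pts.length : Int) 1) a = a := by
    intro a ha0 han
    rw [pvg_eq_getElem _ a ha0 han, PySem.List.getElem_pyRange_one]
    rw [hlen0] at han
    omega
  have hIR0 : InRangeP (PySem.List.pyRange 0 (pts.length : Int) 1) := by
    intro x hx
    rw [PySem.List.mem_pyRange_one] at hx
    rw [hlen0]
    omega
  have hD0 : DecrP (PySem.List.pyRange 0 (pts.length : Int) 1) (fun _ => 0) := by
    intro a ha0 han hne
    exact absurd (hfix0 a ha0 han) hne
  have hLab0 : ∀ x y : Int, 0 ≤ x →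
      x < ((PySem.List.pyRange 0 (pts.length : Int) 1).length : Int) → 0 ≤ y →
      y < ((PySem.List.pyRange 0 (pts.length : Int) 1).length : Int) →
      ((∃ rt, RootOf (PySem.List.pyRange 0 (pts.length : Int) 1) x rt ∧
          RootOf (PySem.List.pyRange 0 (pts.length : Int) 1) y rt) ↔
        pvg (PySem.List.pyRange 0 (pts.length : Int) 1) x =
          pvg (PySem.List.pyRange 0 (pts.length : Int) 1) y) := by
    intro x y hx0 hxn hy0 hyn
    constructor
    · rintro ⟨rt, h1, h2⟩
      have e1 := (rootOf_fix _ x rt (hfix0 x hx0 hxn)).mp h1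
      have e2 := (rootOf_fix _ y rt (hfix0 y hy0 hyn)).mp h2
      rw [hfix0 x hx0 hxn, hfix0 y hy0 hyn]
      omega
    · intro h
      have hxy : x = y := by rw [hfix0 x hx0 hxn, hfix0 y hy0 hyn] at h; exact h
      refine ⟨x, (rootOf_fix _ x x (hfix0 x hx0 hxn)).mpr rfl, ?_⟩
      rw [hxy]
      exact (rootOf_fix _ y y (hfix0 y hy0 hyn)).mpr rfl
  have hloop : pvLoopA edges (PySem.List.pyRange 0 (pts.length : Int) 1)
      (List.replicate pts.length (1 : Int)) (pts.length : Int) =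
      pvLoopB edges (PySem.List.pyRange 0 (pts.length : Int) 1) (pts.length : Int) :=
    loop_eq edges (PySem.List.pyRange 0 (pts.length : Int) 1)
      (List.replicate pts.length (1 : Int)) (PySem.List.pyRange 0 (pts.length : Int) 1)
      (pts.length : Int) (fun _ => 0) rfl hIR0 hD0 hLab0
  simp only [part2_last_union_x_product, part2_last_union_x_product_alt, hloop]

-- ===== VERDICT (by name: the statement is the Claim_ definition above) =====
theorem part2_last_union_x_product_spec : Claim_equal_part2_last_union_x_product := by
  intro pts edges _ _
  unfold Spec_part2_last_union_x_product
  exact parts_eq pts edges
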